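-- pv_equiv track=rewrite | github.com/sudo-hemant/test | geeksForGeeks/backtracking/black-white.py | solve
-- ===== SOURCE A (Python) =====
-- def solve(rows, columns):
--
--     # to help in finding attackbale position by kinght to not write if conditions for 8 attackable positions
--     # this can be made easy by using 2 arrays of size 8 each and the elements simultaneously
--     # representing x & y of attackable positions
--     positions1 = [-2, 2]
--     positions2 = [-1, 1]
--
--     total_pos = rows * columns
--     result = 0
--     mod = 1000000007
--
--     for row in range(rows):
--         for column in range(columns):
--             attackable_pos = 1
--
--             # to find attackable positions by kinght
--             for i in positions1:
--                 for j in positions2: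
--                     if is_safe(row + i, column + j, rows, columns):
--                         attackable_pos += 1
--                     if is_safe(row + j, column + i, rows, columns):
--                         attackable_pos += 1
--
--             result += (total_pos - attackable_pos) % mod
--
--     return result % mod
--
-- def is_safe(x, y, r, c):
--     if x >= 0 and y >= 0 and x < r and y < c:
--         return True
--     return False
-- ===== SOURCE B (Python) =====
-- def solve(rows, columns):
--     # Closed form: each cell contributes (rows*columns) - 1 - (number of knight
--     # moves from it staying on the board); the total number of on-board knight
--     # moves has a product formula, so no iteration over cells is needed.
--     mod = 1000000007
--     if rows <= 0 or columns <= 0: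
--         return 0
--     n = rows * columns
--     knight_moves = (4 * max(rows - 2, 0) * max(columns - 1, 0)
--                     + 4 * max(rows - 1, 0) * max(columns - 2, 0))
--     return (n * (n - 1) - knight_moves) % mod
-- ===== Notes on version B (the rewrite author's own statement) =====
-- stated objective: faster
-- what changed: Replaces the per-cell double loop (with an inner 8-way knight-move scan) by a closed-form expression: the total answer is n*(n-1) minus the closed-form count of on-board knight moves, reduced once mod 1000000007.
import Mathlib
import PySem

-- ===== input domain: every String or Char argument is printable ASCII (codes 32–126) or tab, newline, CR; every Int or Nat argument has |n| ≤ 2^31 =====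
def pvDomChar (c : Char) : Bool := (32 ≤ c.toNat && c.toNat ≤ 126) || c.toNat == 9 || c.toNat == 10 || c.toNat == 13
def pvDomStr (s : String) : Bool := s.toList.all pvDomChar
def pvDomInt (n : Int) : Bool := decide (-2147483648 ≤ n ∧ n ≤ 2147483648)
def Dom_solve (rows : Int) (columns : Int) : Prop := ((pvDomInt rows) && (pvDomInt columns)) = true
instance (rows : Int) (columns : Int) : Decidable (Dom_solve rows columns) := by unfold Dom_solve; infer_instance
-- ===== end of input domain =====

-- B replaces A's cell-by-cell double loop (O(rows*columns)) by the closed-form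
-- count of on-board knight moves, giving the answer arithmetically in O(1).

-- ===== PORT A =====
def is_safe (x : Int) (y : Int) (r : Int) (c : Int) : Bool :=
  if 0 ≤ x ∧ 0 ≤ y ∧ x < r ∧ y < c then true else false

def solve (rows : Int) (columns : Int) : Int :=
  let positions1 : List Int := [-2, 2]
  let positions2 : List Int := [-1, 1]
  let total_pos := rows * columns
  let md : Int := 1000000007
  let result :=
    (PySem.List.pyRange 0 rows 1).foldl (fun result row =>
      (PySem.List.pyRange 0 columns 1).foldl (fun result column =>
        let attackable_pos : Int :=
          positions1.foldl (fun acc i =>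
            positions2.foldl (fun acc j =>
              let acc := if is_safe (row + i) (column + j) rows columns then acc + 1 else acc
              if is_safe (row + j) (column + i) rows columns then acc + 1 else acc) acc) 1
        result + PySem.Int.mod (total_pos - attackable_pos) md) result) 0
  PySem.Int.mod result md

-- ===== PORT B =====
def solve_alt (rows : Int) (columns : Int) : Int :=
  if rows ≤ 0 ∨ columns ≤ 0 then 0
  else
    let n := rows * columns
    let knight_moves := 4 * max (rows - 2) 0 * max (columns - 1) 0
                      + 4 * max (rows - 1) 0 * max (columns - 2) 0
    PySem.Int.mod (n * (n - 1) - knight_moves) 1000000007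

-- ===== PRECONDITION & SPEC =====
def Spec_solve (rows : Int) (columns : Int) (out : Int) : Prop := out = solve_alt rows columns
instance (rows : Int) (columns : Int) (out : Int) : Decidable (Spec_solve rows columns out) := by unfold Spec_solve; infer_instance

-- ===== CLAIM (what is proved, stated in full; the proofs are below) =====
def Claim_equal_solve : Prop := ∀ (rows : Int) (columns : Int), Dom_solve rows columns → Spec_solve rows columns (solve rows columns)

-- ===== LEMMAS AND PROOFS =====

-- sum over [0,c) of a window indicator with value K (Nat-sized range, general bounds)
lemma sum_if_window_nat (n : Nat) (a b K : Int) :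
    (((PySem.List.pyRange 0 (n : Int) 1).map (fun x => if a ≤ x ∧ x < b then K else 0)).sum)
      = K * max (min (n : Int) b - max 0 a) 0 := by
  induction n with
  | zero =>
      rw [show ((0:Nat):Int) = 0 from rfl, PySem.List.pyRange_one_eq_nil le_rfl]
      simp
  | succ m ih =>
      have hm0 : (0:Int) ≤ (m : Int) := Int.natCast_nonneg m
      rw [show ((m + 1 : Nat) : Int) = (m : Int) + 1 by push_cast; ring,
        PySem.List.pyRange_one_succ_right hm0]
      rw [List.map_append, List.sum_append, ih]
      simp only [List.map_cons, List.map_nil, List.sum_cons, List.sum_nil]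
      split_ifs with hm
      · have h1 : max (min ((m:Int)+1) b - max 0 a) 0
            = max (min (m:Int) b - max 0 a) 0 + 1 := by omega
        rw [h1]; ring
      · have h1 : max (min ((m:Int)+1) b - max 0 a) 0
            = max (min (m:Int) b - max 0 a) 0 := by omega
        rw [h1]; ring

lemma sum_if_window (c a b K : Int) :
    (((PySem.List.pyRange 0 c 1).map (fun x => if a ≤ x ∧ x < b then K else 0)).sum)
      = K * max (min c b - max 0 a) 0 := by
  by_cases hc : c ≤ 0
  · have h0 : max (min c b - max 0 a) 0 = 0 := by omega
    rw [PySem.List.pyRange_one_eq_nil hc]; simp [h0]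
  · have : c = ((c.toNat : Nat) : Int) := by omega
    rw [this, sum_if_window_nat]

lemma sum_map_sub_int {α : Type} (l : List α) (f g : α → Int) :
    (l.map (fun y => f y - g y)).sum = (l.map f).sum - (l.map g).sum := by
  induction l with
  | nil => simp
  | cons x xs ih => simp [ih]; ring

lemma sum_mod_congr {α : Type} (l : List α) (f g : α → Int) (p : Int)
    (h : ∀ y ∈ l, f y % p = g y % p) :
    (l.map f).sum % p = (l.map g).sum % p := by
  induction l with
  | nil => rfl
  | cons x xs ih =>
      simp only [List.map_cons, List.sum_cons]
      rw [Int.add_emod, h x (by simp), ih (fun y hy => h y (by simp [hy])), ← Int.add_emod]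

lemma if_inc (b : Prop) [Decidable b] (x : Int) :
    (if b then x + 1 else x) = x + (if b then 1 else 0) := by split <;> simp

lemma safe_factor (r c x y : Int) :
    (if is_safe x y r c = true then (1:Int) else 0)
      = (if 0 ≤ x ∧ x < r then (1:Int) else 0) * (if 0 ≤ y ∧ y < c then 1 else 0) := by
  simp only [is_safe]
  split_ifs <;> first | rfl | omega | simp_all

lemma sum_if_shift (c j B : Int) :
    (((PySem.List.pyRange 0 c 1).map (fun x => if 0 ≤ x + j ∧ x + j < B then (1:Int) else 0)).sum)
      = max (min c (B - j) - max 0 (-j)) 0 := by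
  have h : (fun x : Int => if 0 ≤ x + j ∧ x + j < B then (1:Int) else 0)
      = fun x => if -j ≤ x ∧ x < B - j then (1:Int) else 0 :=
    funext fun x => if_congr (by omega) rfl rfl
  rw [h, sum_if_window]; ring

lemma sum_sum_mod (l1 l2 : List Int) (f : Int → Int → Int) (p : Int) :
    (((l1.map (fun a => ((l2.map (fun b => f a b % p)).sum))).sum) % p)
      = (((l1.map (fun a => ((l2.map (fun b => f a b)).sum))).sum) % p) :=
  sum_mod_congr _ _ _ _ (fun _ _ =>
    sum_mod_congr _ _ _ _ (fun _ _ => Int.emod_emod_of_dvd _ dvd_rfl))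

theorem solve_eq (r c : Int) : solve r c = solve_alt r c := by
  have hp : (0:Int) < 1000000007 := by norm_num
  have hmod : ∀ x : Int, PySem.Int.mod x 1000000007 = x % 1000000007 :=
    fun x => PySem.Int.mod_eq_emod_of_pos hp
  have hW : ∀ j : Int, (((PySem.List.pyRange 0 c 1).map
        (fun x => if 0 ≤ x + j ∧ x + j < c then (1:Int) else 0)).sum)
      = max (min c (c - j) - max 0 (-j)) 0 := fun j => sum_if_shift c j c
  have hV : ∀ i : Int, (((PySem.List.pyRange 0 r 1).map
        (fun x => if 0 ≤ x + i ∧ x + i < r then (1:Int) else 0)).sum)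
      = max (min r (r - i) - max 0 (-i)) 0 := fun i => sum_if_shift r i r
  have hcast : ∀ x : Int, (((x - 0).toNat : Nat) : Int) = max x 0 := fun x => by omega
  unfold solve solve_alt
  simp only [List.foldl_cons, List.foldl_nil, hmod, if_inc, safe_factor,
    PySem.List.foldl_add, zero_add]
  rw [sum_sum_mod]
  simp only [sum_map_sub_int, PySem.List.sum_map_add_int, List.sum_map_mul_left,
    List.sum_map_mul_right, PySem.List.sum_map_const_int, hW, hV,
    PySem.List.length_pyRange_one, hcast]
  by_cases h : r ≤ 0 ∨ c ≤ 0
  · rw [if_pos h]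
    rcases h with h | h
    · have v0 : max r 0 = 0 := by omega
      have v1 : max (min r (r - -2) - max 0 (- -2)) 0 = 0 := by omega
      have v2 : max (min r (r - -1) - max 0 (- -1)) 0 = 0 := by omega
      have v3 : max (min r (r - 1) - max 0 (-1)) 0 = 0 := by omega
      have v4 : max (min r (r - 2) - max 0 (-2)) 0 = 0 := by omega
      rw [v0, v1, v2, v3, v4]; simp
    · have w0 : max c 0 = 0 := by omega
      have w1 : max (min c (c - -1) - max 0 (- -1)) 0 = 0 := by omega
      have w2 : max (min c (c - -2) - max 0 (- -2)) 0 = 0 := by omega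
      have w3 : max (min c (c - 1) - max 0 (-1)) 0 = 0 := by omega
      have w4 : max (min c (c - 2) - max 0 (-2)) 0 = 0 := by omega
      rw [w0, w1, w2, w3, w4]; simp
  · rw [if_neg h]; push Not at h; obtain ⟨hr, hc⟩ := h
    have v0 : max r 0 = r := by omega
    have v1 : max (min r (r - -2) - max 0 (- -2)) 0 = max (r - 2) 0 := by omega
    have v2 : max (min r (r - -1) - max 0 (- -1)) 0 = max (r - 1) 0 := by omega
    have v3 : max (min r (r - 1) - max 0 (-1)) 0 = max (r - 1) 0 := by omega
    have v4 : max (min r (r - 2) - max 0 (-2)) 0 = max (r - 2) 0 := by omega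
    have w0 : max c 0 = c := by omega
    have w1 : max (min c (c - -1) - max 0 (- -1)) 0 = max (c - 1) 0 := by omega
    have w2 : max (min c (c - -2) - max 0 (- -2)) 0 = max (c - 2) 0 := by omega
    have w3 : max (min c (c - 1) - max 0 (-1)) 0 = max (c - 1) 0 := by omega
    have w4 : max (min c (c - 2) - max 0 (-2)) 0 = max (c - 2) 0 := by omega
    rw [v0, v1, v2, v3, v4, w0, w1, w2, w3, w4]
    congr 1
    ring

-- ===== VERDICT (by name: the statement is the Claim_ definition above) =====
theorem solve_spec : Claim_equal_solve := fun rows columns _ => solve_eq rows columns
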